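-- pv_equiv track=rewrite | github.com/vankhoa21991/Drawing | online_recog/preprocess.py | lines2strokes3
-- ===== SOURCE A (Python) =====
-- def lines2strokes3(Lines_in):
--     # Lines in: chars # [x1, x2 ,y1, y2]
--     Chars = []
--     for c in range(len(Lines_in)):         # char c
--         Char = []
--         for s in range(len(Lines_in[c])):  # stroke s
--             for l in range(len(Lines_in[c][s])):
--
--                 dx = Lines_in[c][s][l][1] - Lines_in[c][s][l][0]
--                 dy = Lines_in[c][s][l][3] - Lines_in[c][s][l][2]
--
--                 if l == len(Lines_in[c][s]) - 1 and s == len(Lines_in[c]) - 1:   # end of char: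
--                     si = [1]
--                 else:
--                     si = [0]
--
--                 Char.append([dx, dy] + si)
--
--                 if l == len(Lines_in[c][s]) - 1 and s != len(Lines_in[c]) - 1:   # end of stroke
--                     dx = Lines_in[c][s + 1][0][0] - Lines_in[c][s][l][1]
--                     dy = Lines_in[c][s + 1][0][2] - Lines_in[c][s][l][3]
--                     si = [1]
--                     Char.append([dx, dy] + si)
--
--         Chars.append(Char)
--     return Chars
-- ===== SOURCE B (Python) =====
-- def lines2strokes3(Lines_in):
--     # Walk each char's strokes BACK TO FRONT, prepending each stroke's block:
--     # the successor stroke is remembered in `nxt` for the connector row, and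
--     # the end-of-char flag falls out of the first (reversed) iteration, so no
--     # inline last-line/last-stroke index tests are needed.
--     out = []
--     for char in Lines_in:
--         rows = []
--         nxt = None
--         is_last = True
--         for stroke in reversed(char):
--             if nxt is not None and stroke:
--                 f, p = nxt[0], stroke[-1]
--                 rows = [[f[0] - p[1], f[2] - p[3], 1]] + rows
--             block = [[l[1] - l[0], l[3] - l[2], 0] for l in stroke]
--             if is_last and block:
--                 block[-1][2] = 1
--             rows = block + rows
--             nxt = stroke
--             is_last = False
--         out.append(rows)
--     return out
-- ===== Notes on version B (the rewrite author's own statement) =====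
-- stated objective: alternative
-- what changed: B traverses each char's strokes in REVERSE, prepending each stroke's block to the rows built so far and remembering the successor stroke in a variable for the connector row, so the end-of-char flag is set naturally on the first reversed iteration and no last-line/last-stroke index tests or lookahead zip are needed, unlike A's forward index-based triple loop with inline boundary tests.
import Mathlib
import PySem

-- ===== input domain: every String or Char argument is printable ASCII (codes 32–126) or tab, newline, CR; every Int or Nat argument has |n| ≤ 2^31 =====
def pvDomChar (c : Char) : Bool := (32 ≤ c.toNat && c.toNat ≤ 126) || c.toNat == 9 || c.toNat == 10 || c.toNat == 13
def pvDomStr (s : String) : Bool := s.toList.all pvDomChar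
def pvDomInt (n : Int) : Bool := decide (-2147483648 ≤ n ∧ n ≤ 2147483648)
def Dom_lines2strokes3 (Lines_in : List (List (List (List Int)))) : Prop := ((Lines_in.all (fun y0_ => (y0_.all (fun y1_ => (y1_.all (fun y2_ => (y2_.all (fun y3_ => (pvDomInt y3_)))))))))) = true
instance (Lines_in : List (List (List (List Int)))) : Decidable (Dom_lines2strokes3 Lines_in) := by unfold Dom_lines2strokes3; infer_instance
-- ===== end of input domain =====

-- B walks each char's strokes back to front with a remembered successor stroke, prepending blocks,
-- so the end-of-char flag and connector guards fall out of the traversal (objective: simpler).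

-- ===== PORT A =====
-- inner `for l in range(len(Lines_in[c][s]))` loop: recursion over the stroke carrying the tail
-- (`l == len-1` ↔ tail = []); `isLast` is `s == len(Lines_in[c]) - 1`, `next` is `Lines_in[c][s+1]`
-- (headD of the remaining strokes — exact when the guard `s != len-1` holds).
-- pyGetD: every index is in range under Pre_, where the default is never used.
def pvA_lineLoop (isLast : Bool) (next : List (List Int)) (Char : List (List Int)) : List (List Int) → List (List Int)
  | [] => Char
  | line :: ls =>
    let dx := PySem.List.pyGetD line 1 0 - PySem.List.pyGetD line 0 0
    let dy := PySem.List.pyGetD line 3 0 - PySem.List.pyGetD line 2 0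
    let si : List Int := if ls.isEmpty && isLast then [1] else [0]
    let Char1 := Char ++ [[dx, dy] ++ si]
    let Char2 :=
      if ls.isEmpty && !isLast then
        let dx2 := PySem.List.pyGetD (PySem.List.pyGetD next 0 []) 0 0 - PySem.List.pyGetD line 1 0
        let dy2 := PySem.List.pyGetD (PySem.List.pyGetD next 0 []) 2 0 - PySem.List.pyGetD line 3 0
        Char1 ++ [[dx2, dy2] ++ [1]]
      else Char1
    pvA_lineLoop isLast next Char2 ls

-- `for s in range(len(Lines_in[c]))` loop: recursion over the stroke list carrying the rest
def pvA_strokeLoop (Char : List (List Int)) : List (List (List Int)) → List (List Int)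
  | [] => Char
  | stroke :: rest => pvA_strokeLoop (pvA_lineLoop rest.isEmpty (rest.headD []) Char stroke) rest

def lines2strokes3 (Lines_in : List (List (List (List Int)))) : List (List (List Int)) :=
  Lines_in.foldl (fun Chars char => Chars ++ [pvA_strokeLoop [] char]) []

-- ===== PORT B =====
-- segment row of one line, flag 0  ([l[1]-l[0], l[3]-l[2], 0])
def pvB_seg (l : List Int) : List Int :=
  [PySem.List.pyGetD l 1 0 - PySem.List.pyGetD l 0 0,
   PySem.List.pyGetD l 3 0 - PySem.List.pyGetD l 2 0, 0]

-- connector row  [nxt[0][0]-stroke[-1][1], nxt[0][2]-stroke[-1][3], 1]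
def pvB_conn (stroke nxt : List (List Int)) : List Int :=
  let f := PySem.List.pyGetD nxt 0 ([] : List Int)
  let p := PySem.List.pyGetD stroke (-1) ([] : List Int)
  [PySem.List.pyGetD f 0 0 - PySem.List.pyGetD p 1 0,
   PySem.List.pyGetD f 2 0 - PySem.List.pyGetD p 3 0, 1]

-- one iteration of Source B's `for stroke in reversed(char)` loop; state = (rows, nxt, is_last)
def pvB_step (st : List (List Int) × Option (List (List Int)) × Bool)
    (stroke : List (List Int)) :
    List (List Int) × Option (List (List Int)) × Bool :=
  let rows :=
    match st.2.1 with
    | some n => if !stroke.isEmpty then [pvB_conn stroke n] ++ st.1 else st.1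
    | none => st.1
  let block := stroke.map pvB_seg
  let block :=
    if st.2.2 && !block.isEmpty then
      -- block[-1][2] = 1
      block.dropLast ++ [PySem.List.pySetD (PySem.List.pyGetD block (-1) []) 2 1]
    else block
  (block ++ rows, some stroke, false)

def pvB_char (char : List (List (List Int))) : List (List Int) :=
  (char.reverse.foldl pvB_step ([], none, true)).1

def lines2strokes3_alt (Lines_in : List (List (List (List Int)))) : List (List (List Int)) :=
  Lines_in.foldl (fun out char => out ++ [pvB_char char]) []

-- ===== PRECONDITION & SPEC =====
-- Pre_ = exactly where Python A returns: every line must have ≥ 4 coordinates (A reads indices 0..3),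
-- and a non-empty stroke must never be followed by an empty one (A would index next_stroke[0] → IndexError).
def Pre_lines2strokes3 (Lines_in : List (List (List (List Int)))) : Prop :=
  ∀ char ∈ Lines_in,
    (∀ stroke ∈ char, ∀ line ∈ stroke, 4 ≤ line.length) ∧
    (∀ p ∈ char.zip char.tail, p.1 ≠ [] → p.2 ≠ [])
instance (Lines_in : List (List (List (List Int)))) : Decidable (Pre_lines2strokes3 Lines_in) := by
  unfold Pre_lines2strokes3; infer_instance
def pvWitness_lines2strokes3 : List (List (List (List Int))) :=
  [[[[0, 1, 0, 2]], [[1, 3, 2, 5], [3, 4, 5, 6]]], []]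
def Spec_lines2strokes3 (Lines_in : List (List (List (List Int)))) (out : List (List (List Int))) : Prop := out = lines2strokes3_alt Lines_in
instance (Lines_in : List (List (List (List Int)))) (out : List (List (List Int))) : Decidable (Spec_lines2strokes3 Lines_in out) := by unfold Spec_lines2strokes3; infer_instance

-- ===== CLAIM (what is proved, stated in full; the proofs are below) =====
def Claim_equal_lines2strokes3 : Prop := ∀ (Lines_in : List (List (List (List Int)))), Dom_lines2strokes3 Lines_in → Pre_lines2strokes3 Lines_in → Spec_lines2strokes3 Lines_in (lines2strokes3 Lines_in)

-- ===== LEMMAS AND PROOFS =====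
-- (the two ports agree on every input; the Dom/Pre hypotheses are not needed by the proof)

-- canonical per-char result through which both ports are proved equal
def pvB_block (p : List (List Int) × List (List Int)) : List (List Int) :=
  p.1.map pvB_seg ++ (if !p.1.isEmpty then [pvB_conn p.1 p.2] else [])

-- segment row with the end-of-char flag set
def pvSeg1 (l : List Int) : List Int :=
  [PySem.List.pyGetD l 1 0 - PySem.List.pyGetD l 0 0,
   PySem.List.pyGetD l 3 0 - PySem.List.pyGetD l 2 0, 1]

-- the last stroke's block: all its segment rows, the final one flagged
def pvSeg1Block (s : List (List Int)) : List (List Int) :=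
  if s = [] then [] else s.dropLast.map pvB_seg ++ [pvSeg1 (s.getLastD [])]

def pvCanon (char : List (List (List Int))) : List (List Int) :=
  (char.zip char.tail).flatMap pvB_block ++ pvSeg1Block (char.getLastD [])

theorem pvCanon_cons (s r : List (List Int)) (rs : List (List (List Int))) :
    pvCanon (s :: r :: rs) = pvB_block (s, r) ++ pvCanon (r :: rs) := by
  simp [pvCanon]

-- one-step unfolding of A's line loop, with the conditional append in block form
theorem pvA_lineLoop_cons (b : Bool) (next Char : List (List Int)) (line : List Int)
    (ls : List (List Int)) :
    pvA_lineLoop b next Char (line :: ls) =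
      pvA_lineLoop b next
        (Char ++
          ([[PySem.List.pyGetD line 1 0 - PySem.List.pyGetD line 0 0,
             PySem.List.pyGetD line 3 0 - PySem.List.pyGetD line 2 0] ++
              (if ls.isEmpty && b then [1] else [0])] ++
           (if ls.isEmpty && !b then
              [[PySem.List.pyGetD (PySem.List.pyGetD next 0 []) 0 0 - PySem.List.pyGetD line 1 0,
                PySem.List.pyGetD (PySem.List.pyGetD next 0 []) 2 0 - PySem.List.pyGetD line 3 0] ++ [1]]
            else []))) ls := by
  simp only [pvA_lineLoop]
  split_ifs <;> simp

theorem pvA_lineLoop_acc (b : Bool) (next : List (List Int)) (stroke : List (List Int)) :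
    ∀ Char, pvA_lineLoop b next Char stroke = Char ++ pvA_lineLoop b next [] stroke := by
  induction stroke with
  | nil => intro Char; simp [pvA_lineLoop]
  | cons line ls ih =>
    intro Char
    rw [pvA_lineLoop_cons, pvA_lineLoop_cons b next []]
    rw [ih, ih ([] ++ _)]
    simp [List.append_assoc]

theorem pvA_lineLoop_last (stroke : List (List Int)) (hs : stroke ≠ []) (next : List (List Int)) :
    pvA_lineLoop true next [] stroke
      = stroke.dropLast.map pvB_seg ++ [pvSeg1 (stroke.getLastD [])] := by
  induction stroke with
  | nil => exact absurd rfl hs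
  | cons line ls ih =>
    cases ls with
    | nil => simp [pvA_lineLoop, pvSeg1]
    | cons l2 ls2 =>
      rw [pvA_lineLoop_cons, pvA_lineLoop_acc, ih (by simp)]
      simp [pvB_seg]

theorem pvB_conn_cons (line : List Int) (ls next : List (List Int)) (h : ls ≠ []) :
    pvB_conn (line :: ls) next = pvB_conn ls next := by
  unfold pvB_conn
  rw [PySem.List.pyGetD_neg_one (h := List.cons_ne_nil line ls),
    PySem.List.pyGetD_neg_one (h := h), List.getLast_cons h]

theorem pvA_lineLoop_notLast (stroke next : List (List Int)) :
    pvA_lineLoop false next [] stroke = pvB_block (stroke, next) := by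
  induction stroke with
  | nil => simp [pvA_lineLoop, pvB_block]
  | cons line ls ih =>
    cases ls with
    | nil =>
      have h1 : PySem.List.pyGetD [line] (-1) ([] : List Int) = line := by
        rw [PySem.List.pyGetD_neg_one (h := List.cons_ne_nil line [])]
        simp
      simp [pvA_lineLoop, pvB_block, pvB_seg, pvB_conn, h1]
    | cons l2 ls2 =>
      rw [pvA_lineLoop_cons, pvA_lineLoop_acc, ih]
      simp [pvB_block, pvB_seg, pvB_conn_cons _ _ _ (List.cons_ne_nil l2 ls2)]

theorem pvA_strokeLoop_acc (ss : List (List (List Int))) :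
    ∀ Char, pvA_strokeLoop Char ss = Char ++ pvA_strokeLoop [] ss := by
  induction ss with
  | nil => intro Char; simp [pvA_strokeLoop]
  | cons stroke rest ih =>
    intro Char
    simp only [pvA_strokeLoop]
    rw [ih, ih (pvA_lineLoop _ _ [] _)]
    conv_lhs => rw [pvA_lineLoop_acc]
    simp [List.append_assoc]

-- A's per-char loop computes the canonical result
theorem pvA_char_canon (char : List (List (List Int))) :
    pvA_strokeLoop [] char = pvCanon char := by
  induction char with
  | nil => simp [pvA_strokeLoop, pvCanon, pvSeg1Block]
  | cons s rest ih =>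
    cases rest with
    | nil =>
      have h0 : pvA_strokeLoop [] [s] = pvA_lineLoop true [] [] s := rfl
      rw [h0]
      by_cases hs : s = []
      · subst hs; simp [pvA_lineLoop, pvCanon, pvSeg1Block]
      · rw [pvA_lineLoop_last s hs]
        simp [pvCanon, pvSeg1Block, hs]
    | cons r rs =>
      have h0 : pvA_strokeLoop [] (s :: r :: rs)
          = pvA_strokeLoop (pvA_lineLoop false r [] s) (r :: rs) := rfl
      rw [h0, pvA_strokeLoop_acc, pvA_lineLoop_notLast, ih, pvCanon_cons]

-- the in-place flag patch of the final segment row equals the flagged block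
theorem pv_patch_map (s : List (List Int)) (hs : s ≠ []) :
    (s.map pvB_seg).dropLast ++ [PySem.List.pySetD (PySem.List.pyGetD (s.map pvB_seg) (-1) []) 2 1]
      = s.dropLast.map pvB_seg ++ [pvSeg1 (s.getLastD [])] := by
  have hm : s.map pvB_seg ≠ [] := by simpa using hs
  rw [PySem.List.pyGetD_neg_one (h := hm), List.getLast_map hm, ← List.map_dropLast]
  have hg : s.getLast hs = s.getLastD [] := by
    rw [List.getLastD_eq_getLast?, List.getLast?_eq_some_getLast hs]; rfl
  rw [hg]
  simp [PySem.List.pySetD, PySem.List.pySet?, PySem.List.pyIdx?, pvB_seg, pvSeg1]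

-- B's reverse fold: full characterisation of the state after a non-empty char
theorem pvB_fold_canon (s : List (List Int)) (rest : List (List (List Int))) :
    (s :: rest).reverse.foldl pvB_step ([], none, true)
      = (pvCanon (s :: rest), some s, false) := by
  induction rest generalizing s with
  | nil =>
    simp only [List.reverse_cons, List.reverse_nil, List.nil_append, List.foldl_cons,
      List.foldl_nil]
    by_cases hs : s = []
    · subst hs; simp [pvB_step, pvCanon, pvSeg1Block]
    · have hb : (s.map pvB_seg).isEmpty = false := by simp [hs]
      simp only [pvB_step, hb, Bool.true_and, Bool.not_false, if_true]
      rw [pv_patch_map s hs]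
      simp [pvCanon, pvSeg1Block, hs]
  | cons r rs ih =>
    have hrev : (s :: r :: rs).reverse = (r :: rs).reverse ++ [s] := by simp
    rw [hrev, List.foldl_append, ih r, List.foldl_cons, List.foldl_nil]
    simp only [pvB_step, Bool.false_and, if_neg (Bool.false_ne_true)]
    rw [pvCanon_cons]
    by_cases hs : s = []
    · subst hs; simp [pvB_block]
    · simp [pvB_block, hs]

theorem pv_char_eq (char : List (List (List Int))) :
    pvA_strokeLoop [] char = pvB_char char := by
  cases char with
  | nil => rfl
  | cons s rest =>
    rw [pvA_char_canon]
    unfold pvB_char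
    rw [pvB_fold_canon]

-- ===== VERDICT (by name: the statement is the Claim_ definition above) =====
theorem lines2strokes3_spec : Claim_equal_lines2strokes3 := by
  intro L _ _
  unfold Spec_lines2strokes3 lines2strokes3 lines2strokes3_alt
  rw [PySem.List.foldl_append_singleton_eq_map, PySem.List.foldl_append_singleton_eq_map]
  simp only [List.nil_append]
  exact List.map_congr_left (fun c _ => pv_char_eq c)
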